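-- pv_equiv track=rewrite | github.com/oranolio956/RedditBot | app/services/personality_engine.py | _make_more_extraverted
-- ===== SOURCE A (Python) =====
-- def _make_more_extraverted(response: str) -> str:
--     """Make response more extraverted."""
--     # Add excitement and enthusiasm
--     if not response.endswith(('!', '?', '.')):
--         response += '!'
--
--     # Add energetic words
--     energetic_replacements = {
--         'good': 'great',
--         'ok': 'awesome',
--         'fine': 'fantastic',
--         'yes': 'absolutely',
--         'sure': 'definitely'
--     }
--
--     for old, new in energetic_replacements.items():
--         response = response.replace(old, new)
--
--     return response
-- ===== SOURCE B (Python) =====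
-- def _make_more_extraverted(response: str) -> str:
--     """Make response more extraverted (single left-to-right scan instead of five full-string replaces)."""
--     if not response.endswith(('!', '?', '.')):
--         response += '!'
--
--     replacements = (
--         ('good', 'great'),
--         ('ok', 'awesome'),
--         ('fine', 'fantastic'),
--         ('yes', 'absolutely'),
--         ('sure', 'definitely'),
--     )
--
--     out = []
--     i = 0
--     n = len(response)
--     while i < n:
--         for old, new in replacements:
--             if response.startswith(old, i):
--                 out.append(new)
--                 i += len(old)
--                 break
--         else:
--             out.append(response[i])
--             i += 1
--     return ''.join(out)
-- ===== Notes on version B (the rewrite author's own statement) =====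
-- stated objective: alternative
-- what changed: Replaces the five sequential full-string str.replace passes with one explicit left-to-right scan that at each position tries the five keys in order and emits the replacement or the character; valid because the keys are mutually overlap-free and no replacement value re-creates a key.
import Mathlib
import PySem

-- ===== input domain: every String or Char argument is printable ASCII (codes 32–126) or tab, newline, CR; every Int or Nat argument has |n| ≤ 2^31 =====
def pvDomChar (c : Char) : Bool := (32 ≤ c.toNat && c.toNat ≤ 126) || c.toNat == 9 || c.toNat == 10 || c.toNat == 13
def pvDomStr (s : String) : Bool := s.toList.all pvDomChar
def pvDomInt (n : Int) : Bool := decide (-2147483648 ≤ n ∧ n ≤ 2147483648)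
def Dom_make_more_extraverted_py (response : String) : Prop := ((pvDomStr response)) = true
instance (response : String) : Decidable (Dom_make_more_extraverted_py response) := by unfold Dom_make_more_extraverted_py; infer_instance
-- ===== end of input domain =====

-- B replaces A's five sequential full-string str.replace passes by ONE left-to-right scan that at each
-- position tries the five keys in order (they are overlap-free and no value re-creates a key); same output.

-- ===== PORT A =====
def make_more_extraverted_py (response : String) : String :=
  let response :=
    if !(PySem.Str.endswith response "!" || PySem.Str.endswith response "?" || PySem.Str.endswith response ".")
    then response ++ "!" else response
  -- for old, new in energetic_replacements.items(): response = response.replace(old, new)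
  ([("good", "great"), ("ok", "awesome"), ("fine", "fantastic"),
    ("yes", "absolutely"), ("sure", "definitely")] : List (String × String)).foldl
    (fun r p => PySem.Str.replace r p.1 p.2) response

-- ===== PORT B =====
-- the while/for scanner of Source B: at each position try the five keys in order (break = take the branch),
-- else copy one character; over the char list of the string
def pvScan : List Char → List Char
  | [] => []
  | c :: t =>
    if List.isPrefixOf ['g','o','o','d'] (c :: t) then ['g','r','e','a','t'] ++ pvScan (t.drop 3)
    else if List.isPrefixOf ['o','k'] (c :: t) then ['a','w','e','s','o','m','e'] ++ pvScan (t.drop 1)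
    else if List.isPrefixOf ['f','i','n','e'] (c :: t) then ['f','a','n','t','a','s','t','i','c'] ++ pvScan (t.drop 3)
    else if List.isPrefixOf ['y','e','s'] (c :: t) then ['a','b','s','o','l','u','t','e','l','y'] ++ pvScan (t.drop 2)
    else if List.isPrefixOf ['s','u','r','e'] (c :: t) then ['d','e','f','i','n','i','t','e','l','y'] ++ pvScan (t.drop 3)
    else c :: pvScan t
termination_by s => s.length
decreasing_by all_goals (simp [List.length_drop]; try omega)

def make_more_extraverted_py_alt (response : String) : String :=
  let response :=
    if !(PySem.Str.endswith response "!" || PySem.Str.endswith response "?" || PySem.Str.endswith response ".")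
    then response ++ "!" else response
  String.ofList (pvScan response.toList)

-- ===== PRECONDITION & SPEC =====
def Spec_make_more_extraverted_py (response : String) (out : String) : Prop := out = make_more_extraverted_py_alt response
instance (response : String) (out : String) : Decidable (Spec_make_more_extraverted_py response out) := by unfold Spec_make_more_extraverted_py; infer_instance

-- ===== CLAIM (what is proved, stated in full; the proofs are below) =====
def Claim_equal_make_more_extraverted_py : Prop := ∀ (response : String), Dom_make_more_extraverted_py response → Spec_make_more_extraverted_py response (make_more_extraverted_py response)

-- ===== LEMMAS AND PROOFS =====

-- Simple structural recursion equal to PySem.Chars.replace for a nonempty needle o :: os.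
def pvRep (o : Char) (os : List Char) (nw : List Char) : List Char → List Char
  | [] => []
  | c :: t =>
    if List.isPrefixOf (o :: os) (c :: t) then nw ++ pvRep o os nw (t.drop os.length)
    else c :: pvRep o os nw t
termination_by s => s.length
decreasing_by all_goals (simp [List.length_drop]; try omega)

theorem pvRep_nil (o : Char) (os nw : List Char) : pvRep o os nw [] = [] := by simp [pvRep]

theorem pvRep_cons (o : Char) (os nw : List Char) (c : Char) (t : List Char) :
    pvRep o os nw (c :: t) =
      if List.isPrefixOf (o :: os) (c :: t) then nw ++ pvRep o os nw (t.drop os.length)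
      else c :: pvRep o os nw t := by
  rw [pvRep]

theorem pvGo_eq (o : Char) (os nw : List Char) :
    ∀ (fuel : Nat) (l acc : List Char), l.length ≤ fuel →
      PySem.Chars.replace.go (o :: os) nw fuel l acc = acc.reverse ++ pvRep o os nw l := by
  intro fuel
  induction fuel with
  | zero =>
    intro l acc h
    have hl : l = [] := List.eq_nil_of_length_eq_zero (Nat.le_zero.mp h)
    subst hl
    rw [PySem.Chars.replace.go]
    simp [pvRep_nil]
  | succ f ih =>
    intro l acc h
    cases l with
    | nil =>
      rw [PySem.Chars.replace.go]
      all_goals simp [pvRep_nil]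
    | cons c t =>
      have ht : t.length ≤ f := by simp at h; omega
      rw [PySem.Chars.replace.go, pvRep_cons]
      by_cases hp : List.isPrefixOf (o :: os) (c :: t) = true
      · rw [if_pos hp, if_pos hp]
        have hd : List.drop (o :: os).length (c :: t) = t.drop os.length := by
          simp [List.length_cons]
        rw [hd, ih _ _ (by simp [List.length_drop]; omega)]
        simp
      · rw [if_neg hp, if_neg hp, ih _ _ ht]
        simp

theorem pvReplace_eq (o : Char) (os nw s : List Char) :
    PySem.Chars.replace s (o :: os) nw = pvRep o os nw s := by
  rw [PySem.Chars.replace]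
  simp only [List.isEmpty_cons, if_false, Bool.false_eq_true]
  rw [pvGo_eq o os nw s.length s [] (le_refl _)]
  simp

-- the five sequential replaces of A, on char lists
def pvR1 (l : List Char) : List Char := pvRep 'g' ['o','o','d'] ['g','r','e','a','t'] l
def pvR2 (l : List Char) : List Char := pvRep 'o' ['k'] ['a','w','e','s','o','m','e'] l
def pvR3 (l : List Char) : List Char := pvRep 'f' ['i','n','e'] ['f','a','n','t','a','s','t','i','c'] l
def pvR4 (l : List Char) : List Char := pvRep 'y' ['e','s'] ['a','b','s','o','l','u','t','e','l','y'] l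
def pvR5 (l : List Char) : List Char := pvRep 's' ['u','r','e'] ['d','e','f','i','n','i','t','e','l','y'] l
def pvChain (l : List Char) : List Char := pvR5 (pvR4 (pvR3 (pvR2 (pvR1 l))))

-- head of a replace result: either the value's first char or the input's head
theorem pvRep_head (o : Char) (os : List Char) (n0 : Char) (ns : List Char) (l : List Char) (d : Char)
    (h : (pvRep o os (n0 :: ns) l).head? = some d) : d = n0 ∨ l.head? = some d := by
  cases l with
  | nil => rw [pvRep_nil] at h; simp at h
  | cons c t =>
    rw [pvRep_cons] at h
    by_cases hp : List.isPrefixOf (o :: os) (c :: t) = true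
    · rw [if_pos hp] at h; simp at h; exact Or.inl h.symm
    · rw [if_neg hp] at h; simp at h; exact Or.inr (by simp [h])

-- the five front-match cases of the chain, via per-literal pass/match steps
theorem pvMatch1 (X : List Char) : pvR1 ('g'::'o'::'o'::'d'::X) = 'g'::'r'::'e'::'a'::'t'::pvR1 X := by
  simp [pvR1, pvRep_cons, List.isPrefixOf]

theorem pvMatch2 (X : List Char) : pvR2 ('o'::'k'::X) = 'a'::'w'::'e'::'s'::'o'::'m'::'e'::pvR2 X := by
  simp [pvR2, pvRep_cons, List.isPrefixOf]

theorem pvMatch3 (X : List Char) : pvR3 ('f'::'i'::'n'::'e'::X) = 'f'::'a'::'n'::'t'::'a'::'s'::'t'::'i'::'c'::pvR3 X := by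
  simp [pvR3, pvRep_cons, List.isPrefixOf]

theorem pvMatch4 (X : List Char) : pvR4 ('y'::'e'::'s'::X) = 'a'::'b'::'s'::'o'::'l'::'u'::'t'::'e'::'l'::'y'::pvR4 X := by
  simp [pvR4, pvRep_cons, List.isPrefixOf]

theorem pvMatch5 (X : List Char) : pvR5 ('s'::'u'::'r'::'e'::X) = 'd'::'e'::'f'::'i'::'n'::'i'::'t'::'e'::'l'::'y'::pvR5 X := by
  simp [pvR5, pvRep_cons, List.isPrefixOf]

theorem pvPassV1R2 (X : List Char) : pvR2 ('g'::'r'::'e'::'a'::'t'::X) = 'g'::'r'::'e'::'a'::'t'::pvR2 X := by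
  simp [pvR2, pvRep_cons, List.isPrefixOf]

theorem pvPassV1R3 (X : List Char) : pvR3 ('g'::'r'::'e'::'a'::'t'::X) = 'g'::'r'::'e'::'a'::'t'::pvR3 X := by
  simp [pvR3, pvRep_cons, List.isPrefixOf]

theorem pvPassV1R4 (X : List Char) : pvR4 ('g'::'r'::'e'::'a'::'t'::X) = 'g'::'r'::'e'::'a'::'t'::pvR4 X := by
  simp [pvR4, pvRep_cons, List.isPrefixOf]

theorem pvPassV1R5 (X : List Char) : pvR5 ('g'::'r'::'e'::'a'::'t'::X) = 'g'::'r'::'e'::'a'::'t'::pvR5 X := by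
  simp [pvR5, pvRep_cons, List.isPrefixOf]

theorem pvPassV2R3 (X : List Char) : pvR3 ('a'::'w'::'e'::'s'::'o'::'m'::'e'::X) = 'a'::'w'::'e'::'s'::'o'::'m'::'e'::pvR3 X := by
  simp [pvR3, pvRep_cons, List.isPrefixOf]

theorem pvPassV2R4 (X : List Char) : pvR4 ('a'::'w'::'e'::'s'::'o'::'m'::'e'::X) = 'a'::'w'::'e'::'s'::'o'::'m'::'e'::pvR4 X := by
  simp [pvR4, pvRep_cons, List.isPrefixOf]

theorem pvPassV2R5 (X : List Char) : pvR5 ('a'::'w'::'e'::'s'::'o'::'m'::'e'::X) = 'a'::'w'::'e'::'s'::'o'::'m'::'e'::pvR5 X := by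
  simp [pvR5, pvRep_cons, List.isPrefixOf]

theorem pvPassV3R4 (X : List Char) : pvR4 ('f'::'a'::'n'::'t'::'a'::'s'::'t'::'i'::'c'::X) = 'f'::'a'::'n'::'t'::'a'::'s'::'t'::'i'::'c'::pvR4 X := by
  simp [pvR4, pvRep_cons, List.isPrefixOf]

theorem pvPassV3R5 (X : List Char) : pvR5 ('f'::'a'::'n'::'t'::'a'::'s'::'t'::'i'::'c'::X) = 'f'::'a'::'n'::'t'::'a'::'s'::'t'::'i'::'c'::pvR5 X := by
  simp [pvR5, pvRep_cons, List.isPrefixOf]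

theorem pvPassV4R5 (X : List Char) : pvR5 ('a'::'b'::'s'::'o'::'l'::'u'::'t'::'e'::'l'::'y'::X) = 'a'::'b'::'s'::'o'::'l'::'u'::'t'::'e'::'l'::'y'::pvR5 X := by
  simp [pvR5, pvRep_cons, List.isPrefixOf]

theorem pvPassK2R1 (X : List Char) : pvR1 ('o'::'k'::X) = 'o'::'k'::pvR1 X := by
  simp [pvR1, pvRep_cons, List.isPrefixOf]

theorem pvPassK3R1 (X : List Char) : pvR1 ('f'::'i'::'n'::'e'::X) = 'f'::'i'::'n'::'e'::pvR1 X := by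
  simp [pvR1, pvRep_cons, List.isPrefixOf]

theorem pvPassK3R2 (X : List Char) : pvR2 ('f'::'i'::'n'::'e'::X) = 'f'::'i'::'n'::'e'::pvR2 X := by
  simp [pvR2, pvRep_cons, List.isPrefixOf]

theorem pvPassK4R1 (X : List Char) : pvR1 ('y'::'e'::'s'::X) = 'y'::'e'::'s'::pvR1 X := by
  simp [pvR1, pvRep_cons, List.isPrefixOf]

theorem pvPassK4R2 (X : List Char) : pvR2 ('y'::'e'::'s'::X) = 'y'::'e'::'s'::pvR2 X := by
  simp [pvR2, pvRep_cons, List.isPrefixOf]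

theorem pvPassK4R3 (X : List Char) : pvR3 ('y'::'e'::'s'::X) = 'y'::'e'::'s'::pvR3 X := by
  simp [pvR3, pvRep_cons, List.isPrefixOf]

theorem pvPassK5R1 (X : List Char) : pvR1 ('s'::'u'::'r'::'e'::X) = 's'::'u'::'r'::'e'::pvR1 X := by
  simp [pvR1, pvRep_cons, List.isPrefixOf]

theorem pvPassK5R2 (X : List Char) : pvR2 ('s'::'u'::'r'::'e'::X) = 's'::'u'::'r'::'e'::pvR2 X := by
  simp [pvR2, pvRep_cons, List.isPrefixOf]

theorem pvPassK5R3 (X : List Char) : pvR3 ('s'::'u'::'r'::'e'::X) = 's'::'u'::'r'::'e'::pvR3 X := by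
  simp [pvR3, pvRep_cons, List.isPrefixOf]

theorem pvPassK5R4 (X : List Char) : pvR4 ('s'::'u'::'r'::'e'::X) = 's'::'u'::'r'::'e'::pvR4 X := by
  simp [pvR4, pvRep_cons, List.isPrefixOf]

theorem chain_good (X : List Char) :
    pvChain ('g'::'o'::'o'::'d'::X) = ['g','r','e','a','t'] ++ pvChain X := by
  simp only [pvChain]
  rw [pvMatch1, pvPassV1R2, pvPassV1R3, pvPassV1R4, pvPassV1R5]
  rfl

theorem chain_ok (X : List Char) :
    pvChain ('o'::'k'::X) = ['a','w','e','s','o','m','e'] ++ pvChain X := by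
  simp only [pvChain]
  rw [pvPassK2R1, pvMatch2, pvPassV2R3, pvPassV2R4, pvPassV2R5]
  rfl

theorem chain_fine (X : List Char) :
    pvChain ('f'::'i'::'n'::'e'::X) = ['f','a','n','t','a','s','t','i','c'] ++ pvChain X := by
  simp only [pvChain]
  rw [pvPassK3R1, pvPassK3R2, pvMatch3, pvPassV3R4, pvPassV3R5]
  rfl

theorem chain_yes (X : List Char) :
    pvChain ('y'::'e'::'s'::X) = ['a','b','s','o','l','u','t','e','l','y'] ++ pvChain X := by
  simp only [pvChain]
  rw [pvPassK4R1, pvPassK4R2, pvPassK4R3, pvMatch4, pvPassV4R5]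
  rfl

theorem chain_sure (X : List Char) :
    pvChain ('s'::'u'::'r'::'e'::X) = ['d','e','f','i','n','i','t','e','l','y'] ++ pvChain X := by
  simp only [pvChain]
  rw [pvPassK5R1, pvPassK5R2, pvPassK5R3, pvPassK5R4, pvMatch5]
  rfl

-- heads of partial chains are a value head or the input head
theorem head_chain2 (t : List Char) (d : Char) (h : (pvR2 (pvR1 t)).head? = some d) :
    d = 'a' ∨ d = 'g' ∨ t.head? = some d := by
  simp only [pvR1, pvR2] at h
  rcases pvRep_head _ _ _ _ _ _ h with h2 | h2
  · exact Or.inl h2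
  · rcases pvRep_head _ _ _ _ _ _ h2 with h3 | h3
    · exact Or.inr (Or.inl h3)
    · exact Or.inr (Or.inr h3)

theorem head_chain3 (t : List Char) (d : Char) (h : (pvR3 (pvR2 (pvR1 t))).head? = some d) :
    d = 'f' ∨ d = 'a' ∨ d = 'g' ∨ t.head? = some d := by
  simp only [pvR3] at h
  rcases pvRep_head _ _ _ _ _ _ h with h2 | h2
  · exact Or.inl h2
  · exact Or.inr (head_chain2 t d h2)

theorem head_chain4 (t : List Char) (d : Char) (h : (pvR4 (pvR3 (pvR2 (pvR1 t)))).head? = some d) :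
    d = 'a' ∨ d = 'f' ∨ d = 'a' ∨ d = 'g' ∨ t.head? = some d := by
  simp only [pvR4] at h
  rcases pvRep_head _ _ _ _ _ _ h with h2 | h2
  · exact Or.inl h2
  · exact Or.inr (head_chain3 t d h2)

-- a head? fact gives the list's shape
theorem head_shape {X : List Char} {a : Char} (h : X.head? = some a) : ∃ X', X = a :: X' := by
  cases X with
  | nil => simp at h
  | cons x xs => simp at h; exact ⟨xs, by rw [h]⟩

theorem pfx_head' {a : Char} {as X : List Char} (h : (a :: as) <+: X) : X.head? = some a := by
  obtain ⟨u, hu⟩ := h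
  rw [← hu]; simp

-- 'ine'/'es'/'ure' cannot appear as a prefix AFTER the earlier replaces unless it was one before
theorem unwind3 (t : List Char) (h : ¬ ['i','n','e'] <+: t) :
    ¬ ['i','n','e'] <+: pvR2 (pvR1 t) := by
  intro hx
  rcases head_chain2 t 'i' (pfx_head' hx) with h1 | h1 | h1
  · exact absurd h1 (by decide)
  · exact absurd h1 (by decide)
  obtain ⟨t1, rfl⟩ := head_shape h1
  rw [show pvR2 (pvR1 ('i' :: t1)) = 'i' :: pvR2 (pvR1 t1) from by
        simp [pvR1, pvR2, pvRep_cons, List.isPrefixOf]] at hx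
  rw [List.cons_prefix_cons] at hx
  rcases head_chain2 t1 'n' (pfx_head' hx.2) with g1 | g1 | g1
  · exact absurd g1 (by decide)
  · exact absurd g1 (by decide)
  obtain ⟨t2, rfl⟩ := head_shape g1
  rw [show pvR2 (pvR1 ('n' :: t2)) = 'n' :: pvR2 (pvR1 t2) from by
        simp [pvR1, pvR2, pvRep_cons, List.isPrefixOf]] at hx
  rw [List.cons_prefix_cons] at hx
  rcases head_chain2 t2 'e' (pfx_head' hx.2.2) with g2 | g2 | g2
  · exact absurd g2 (by decide)
  · exact absurd g2 (by decide)
  obtain ⟨t3, rfl⟩ := head_shape g2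
  exact h (by simp [List.cons_prefix_cons])

theorem unwind4 (t : List Char) (h : ¬ ['e','s'] <+: t) :
    ¬ ['e','s'] <+: pvR3 (pvR2 (pvR1 t)) := by
  intro hx
  rcases head_chain3 t 'e' (pfx_head' hx) with h1 | h1 | h1 | h1
  · exact absurd h1 (by decide)
  · exact absurd h1 (by decide)
  · exact absurd h1 (by decide)
  obtain ⟨t1, rfl⟩ := head_shape h1
  rw [show pvR3 (pvR2 (pvR1 ('e' :: t1))) = 'e' :: pvR3 (pvR2 (pvR1 t1)) from by
        simp [pvR1, pvR2, pvR3, pvRep_cons, List.isPrefixOf]] at hx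
  rw [List.cons_prefix_cons] at hx
  rcases head_chain3 t1 's' (pfx_head' hx.2) with g1 | g1 | g1 | g1
  · exact absurd g1 (by decide)
  · exact absurd g1 (by decide)
  · exact absurd g1 (by decide)
  obtain ⟨t2, rfl⟩ := head_shape g1
  exact h (by simp [List.cons_prefix_cons])

theorem unwind5 (t : List Char) (h : ¬ ['u','r','e'] <+: t) :
    ¬ ['u','r','e'] <+: pvR4 (pvR3 (pvR2 (pvR1 t))) := by
  intro hx
  rcases head_chain4 t 'u' (pfx_head' hx) with h1 | h1 | h1 | h1 | h1
  · exact absurd h1 (by decide)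
  · exact absurd h1 (by decide)
  · exact absurd h1 (by decide)
  · exact absurd h1 (by decide)
  obtain ⟨t1, rfl⟩ := head_shape h1
  rw [show pvR4 (pvR3 (pvR2 (pvR1 ('u' :: t1)))) = 'u' :: pvR4 (pvR3 (pvR2 (pvR1 t1))) from by
        simp [pvR1, pvR2, pvR3, pvR4, pvRep_cons, List.isPrefixOf]] at hx
  rw [List.cons_prefix_cons] at hx
  rcases head_chain4 t1 'r' (pfx_head' hx.2) with g1 | g1 | g1 | g1 | g1
  · exact absurd g1 (by decide)
  · exact absurd g1 (by decide)
  · exact absurd g1 (by decide)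
  · exact absurd g1 (by decide)
  obtain ⟨t2, rfl⟩ := head_shape g1
  rw [show pvR4 (pvR3 (pvR2 (pvR1 ('r' :: t2)))) = 'r' :: pvR4 (pvR3 (pvR2 (pvR1 t2))) from by
        simp [pvR1, pvR2, pvR3, pvR4, pvRep_cons, List.isPrefixOf]] at hx
  rw [List.cons_prefix_cons] at hx
  rcases head_chain4 t2 'e' (pfx_head' hx.2.2) with g2 | g2 | g2 | g2 | g2
  · exact absurd g2 (by decide)
  · exact absurd g2 (by decide)
  · exact absurd g2 (by decide)
  · exact absurd g2 (by decide)
  obtain ⟨t3, rfl⟩ := head_shape g2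
  exact h (by simp [List.cons_prefix_cons])

theorem chain_cons_nomatch (c : Char) (t : List Char)
    (h1 : ¬ ['g','o','o','d'] <+: (c :: t))
    (h2 : ¬ ['o','k'] <+: (c :: t))
    (h3 : ¬ ['f','i','n','e'] <+: (c :: t))
    (h4 : ¬ ['y','e','s'] <+: (c :: t))
    (h5 : ¬ ['s','u','r','e'] <+: (c :: t)) :
    pvChain (c :: t) = c :: pvChain t := by
  have e1 : pvR1 (c :: t) = c :: pvR1 t := by
    simp only [pvR1]; rw [pvRep_cons, if_neg (by rw [List.isPrefixOf_iff_prefix]; exact h1)]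
  have hp2 : ¬ (List.isPrefixOf ['o','k'] (c :: pvR1 t) = true) := by
    intro hx
    rw [List.isPrefixOf_iff_prefix, List.cons_prefix_cons] at hx
    obtain ⟨hc, hx2⟩ := hx
    subst hc
    rcases pvRep_head _ _ _ _ _ _ (pfx_head' hx2) with g | g
    · exact absurd g (by decide)
    · obtain ⟨t1, rfl⟩ := head_shape g
      exact h2 (by simp [List.cons_prefix_cons])
  have e2 : pvR2 (c :: pvR1 t) = c :: pvR2 (pvR1 t) := by
    simp only [pvR2]; rw [pvRep_cons, if_neg hp2]
  have hp3 : ¬ (List.isPrefixOf ['f','i','n','e'] (c :: pvR2 (pvR1 t)) = true) := by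
    intro hx
    rw [List.isPrefixOf_iff_prefix, List.cons_prefix_cons] at hx
    obtain ⟨hc, hx2⟩ := hx
    subst hc
    exact unwind3 t (fun hp => h3 (by rw [List.cons_prefix_cons]; exact ⟨rfl, hp⟩)) hx2
  have e3 : pvR3 (c :: pvR2 (pvR1 t)) = c :: pvR3 (pvR2 (pvR1 t)) := by
    simp only [pvR3]; rw [pvRep_cons, if_neg hp3]
  have hp4 : ¬ (List.isPrefixOf ['y','e','s'] (c :: pvR3 (pvR2 (pvR1 t))) = true) := by
    intro hx
    rw [List.isPrefixOf_iff_prefix, List.cons_prefix_cons] at hx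
    obtain ⟨hc, hx2⟩ := hx
    subst hc
    exact unwind4 t (fun hp => h4 (by rw [List.cons_prefix_cons]; exact ⟨rfl, hp⟩)) hx2
  have e4 : pvR4 (c :: pvR3 (pvR2 (pvR1 t))) = c :: pvR4 (pvR3 (pvR2 (pvR1 t))) := by
    simp only [pvR4]; rw [pvRep_cons, if_neg hp4]
  have hp5 : ¬ (List.isPrefixOf ['s','u','r','e'] (c :: pvR4 (pvR3 (pvR2 (pvR1 t)))) = true) := by
    intro hx
    rw [List.isPrefixOf_iff_prefix, List.cons_prefix_cons] at hx
    obtain ⟨hc, hx2⟩ := hx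
    subst hc
    exact unwind5 t (fun hp => h5 (by rw [List.cons_prefix_cons]; exact ⟨rfl, hp⟩)) hx2
  have e5 : pvR5 (c :: pvR4 (pvR3 (pvR2 (pvR1 t)))) = c :: pvR5 (pvR4 (pvR3 (pvR2 (pvR1 t)))) := by
    simp only [pvR5]; rw [pvRep_cons, if_neg hp5]
  show pvR5 (pvR4 (pvR3 (pvR2 (pvR1 (c :: t))))) = c :: pvR5 (pvR4 (pvR3 (pvR2 (pvR1 t))))
  rw [e1, e2, e3, e4, e5]

theorem pvMain : ∀ (n : Nat) (l : List Char), l.length ≤ n → pvChain l = pvScan l := by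
  intro n
  induction n with
  | zero =>
    intro l h
    have hl : l = [] := List.eq_nil_of_length_eq_zero (Nat.le_zero.mp h)
    subst hl
    simp [pvChain, pvR1, pvR2, pvR3, pvR4, pvR5, pvRep_nil, pvScan]
  | succ n ih =>
    intro l h
    cases l with
    | nil => simp [pvChain, pvR1, pvR2, pvR3, pvR4, pvR5, pvRep_nil, pvScan]
    | cons c t =>
      by_cases h1 : List.isPrefixOf ['g','o','o','d'] (c :: t) = true
      · obtain ⟨u, hu⟩ := List.isPrefixOf_iff_prefix.mp h1
        injection hu.symm with hc ht
        subst hc; subst ht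
        show pvChain ('g'::'o'::'o'::'d'::u) = pvScan ('g'::'o'::'o'::'d'::u)
        rw [chain_good, ih u (by simp at h ⊢; omega)]
        conv_rhs => rw [pvScan]
        simp [List.isPrefixOf]
      by_cases h2 : List.isPrefixOf ['o','k'] (c :: t) = true
      · obtain ⟨u, hu⟩ := List.isPrefixOf_iff_prefix.mp h2
        injection hu.symm with hc ht
        subst hc; subst ht
        show pvChain ('o'::'k'::u) = pvScan ('o'::'k'::u)
        rw [chain_ok, ih u (by simp at h ⊢; omega)]
        conv_rhs => rw [pvScan]
        simp [List.isPrefixOf]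
      by_cases h3 : List.isPrefixOf ['f','i','n','e'] (c :: t) = true
      · obtain ⟨u, hu⟩ := List.isPrefixOf_iff_prefix.mp h3
        injection hu.symm with hc ht
        subst hc; subst ht
        show pvChain ('f'::'i'::'n'::'e'::u) = pvScan ('f'::'i'::'n'::'e'::u)
        rw [chain_fine, ih u (by simp at h ⊢; omega)]
        conv_rhs => rw [pvScan]
        simp [List.isPrefixOf]
      by_cases h4 : List.isPrefixOf ['y','e','s'] (c :: t) = true
      · obtain ⟨u, hu⟩ := List.isPrefixOf_iff_prefix.mp h4
        injection hu.symm with hc ht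
        subst hc; subst ht
        show pvChain ('y'::'e'::'s'::u) = pvScan ('y'::'e'::'s'::u)
        rw [chain_yes, ih u (by simp at h ⊢; omega)]
        conv_rhs => rw [pvScan]
        simp [List.isPrefixOf]
      by_cases h5 : List.isPrefixOf ['s','u','r','e'] (c :: t) = true
      · obtain ⟨u, hu⟩ := List.isPrefixOf_iff_prefix.mp h5
        injection hu.symm with hc ht
        subst hc; subst ht
        show pvChain ('s'::'u'::'r'::'e'::u) = pvScan ('s'::'u'::'r'::'e'::u)
        rw [chain_sure, ih u (by simp at h ⊢; omega)]
        conv_rhs => rw [pvScan]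
        simp [List.isPrefixOf]
      · rw [chain_cons_nomatch c t
            (fun hp => h1 (List.isPrefixOf_iff_prefix.mpr hp))
            (fun hp => h2 (List.isPrefixOf_iff_prefix.mpr hp))
            (fun hp => h3 (List.isPrefixOf_iff_prefix.mpr hp))
            (fun hp => h4 (List.isPrefixOf_iff_prefix.mpr hp))
            (fun hp => h5 (List.isPrefixOf_iff_prefix.mpr hp)),
           ih t (by simp at h; omega)]
        conv_rhs => rw [pvScan]
        rw [if_neg h1, if_neg h2, if_neg h3, if_neg h4, if_neg h5]

-- ===== VERDICT (by name: the statement is the Claim_ definition above) =====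
theorem make_more_extraverted_py_spec : Claim_equal_make_more_extraverted_py := by
  intro response _
  unfold Spec_make_more_extraverted_py make_more_extraverted_py make_more_extraverted_py_alt
  set r := (if !(PySem.Str.endswith response "!" || PySem.Str.endswith response "?" || PySem.Str.endswith response ".")
            then response ++ "!" else response) with hr
  simp only [List.foldl]
  simp only [PySem.Str.replace, String.toList_ofList]
  rw [show ("good".toList) = 'g' :: ['o','o','d'] from rfl,
      show ("ok".toList) = 'o' :: ['k'] from rfl,
      show ("fine".toList) = 'f' :: ['i','n','e'] from rfl,
      show ("yes".toList) = 'y' :: ['e','s'] from rfl,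
      show ("sure".toList) = 's' :: ['u','r','e'] from rfl,
      pvReplace_eq, pvReplace_eq, pvReplace_eq, pvReplace_eq, pvReplace_eq]
  exact congrArg String.ofList (pvMain r.toList.length r.toList le_rfl)
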